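-- pv_equiv track=rewrite | github.com/nightjuggler/aoc | 2016/07.py | supports_ssl
-- ===== SOURCE A (Python) =====
-- def supports_ssl(line):
-- 	abas = set()
-- 	babs = set()
-- 	for i in range(len(line) - 2):
-- 		a = line[i]
-- 		if a in '[]':
-- 			abas, babs = babs, abas
--
-- 		elif a == line[i+2] and a != (b := line[i+1]) and b not in '[]':
-- 			if (b, a) in babs:
-- 				return True
-- 			abas.add((a, b))
-- 	return False
-- ===== SOURCE B (Python) =====
-- def supports_ssl(line):
--     # Parse the line into segments alternating supernet/hypernet, then
--     # collect ABA patterns from supernets and (reversed) BAB patterns from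
--     # hypernets and intersect the two sets.
--     segs = []
--     cur = []
--     for ch in line:
--         if ch in '[]':
--             segs.append(cur)
--             cur = []
--         else:
--             cur.append(ch)
--     segs.append(cur)
--     abas = set()
--     babs = set()
--     hyper = False
--     for seg in segs:
--         for i in range(len(seg) - 2):
--             a, b = seg[i], seg[i + 1]
--             if a == seg[i + 2] and a != b:
--                 if hyper:
--                     babs.add((b, a))
--                 else:
--                     abas.add((a, b))
--         hyper = not hyper
--     return bool(abas & babs)
-- ===== Notes on version B (the rewrite author's own statement) =====
-- stated objective: alternative
-- what changed: A does one interleaved scan that swaps its two pattern sets at every bracket and returns early on the first ABA/BAB match; B first parses the line into alternating supernet/hypernet segments, then collects the full ABA set and the (reversed) BAB set and returns whether their intersection is nonempty.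
import Mathlib
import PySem

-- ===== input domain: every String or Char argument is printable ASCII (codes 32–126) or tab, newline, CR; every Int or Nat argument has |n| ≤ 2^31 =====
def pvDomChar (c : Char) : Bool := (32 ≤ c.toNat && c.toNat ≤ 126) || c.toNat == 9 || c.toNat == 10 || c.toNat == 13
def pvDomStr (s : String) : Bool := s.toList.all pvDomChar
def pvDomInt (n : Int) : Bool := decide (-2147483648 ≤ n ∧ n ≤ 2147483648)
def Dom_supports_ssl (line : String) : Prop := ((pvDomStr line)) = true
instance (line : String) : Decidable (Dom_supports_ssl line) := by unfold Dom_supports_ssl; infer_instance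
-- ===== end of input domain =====

-- B parses the line into alternating supernet/hypernet segments and intersects
-- the full ABA and (reversed) BAB pattern sets, instead of A's interleaved
-- single scan with set swapping and early return (objective: alternative).


-- ===== PORT A =====
-- A's loop over i in range(len(line)-2), reading line[i], line[i+1], line[i+2],
-- becomes the obvious sliding-window structural recursion over the same chars,
-- carrying the two sets (swapped at every bracket) and the early return.
def pvAloop : List Char → PySem.Set (Char × Char) → PySem.Set (Char × Char) → Bool
  | a :: b :: c :: rest, abas, babs =>
    if a = '[' ∨ a = ']' then
      pvAloop (b :: c :: rest) babs abas
    else if a = c ∧ a ≠ b ∧ ¬(b = '[' ∨ b = ']') then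
      if (b, a) ∈ babs then true
      else pvAloop (b :: c :: rest) (PySem.Set.add abas (a, b)) babs
    else
      pvAloop (b :: c :: rest) abas babs
  | _, _, _ => false

def supports_ssl (line : String) : Bool :=
  pvAloop line.toList PySem.Set.empty PySem.Set.empty

-- ===== PORT B =====
-- Source B's first loop: split the chars into segments at '[' / ']'
def pvSegs : List Char → List Char → List (List Char)
  | [], cur => [cur]
  | ch :: rest, cur =>
    if ch = '[' ∨ ch = ']' then cur :: pvSegs rest []
    else pvSegs rest (cur ++ [ch])

-- Source B's inner index loop over one segment: the sliding-window recursion adding patterns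
def pvScanSeg : List Char → Bool → PySem.Set (Char × Char) → PySem.Set (Char × Char) →
    PySem.Set (Char × Char) × PySem.Set (Char × Char)
  | a :: b :: c :: rest, hyper, abas, babs =>
    if a = c ∧ a ≠ b then
      if hyper then pvScanSeg (b :: c :: rest) hyper abas (PySem.Set.add babs (b, a))
      else pvScanSeg (b :: c :: rest) hyper (PySem.Set.add abas (a, b)) babs
    else pvScanSeg (b :: c :: rest) hyper abas babs
  | _, _, abas, babs => (abas, babs)

-- Source B's outer loop over segments, toggling `hyper`
def pvCollect : List (List Char) → Bool → PySem.Set (Char × Char) → PySem.Set (Char × Char) →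
    PySem.Set (Char × Char) × PySem.Set (Char × Char)
  | [], _, abas, babs => (abas, babs)
  | seg :: rest, hyper, abas, babs =>
    let p := pvScanSeg seg hyper abas babs
    pvCollect rest (!hyper) p.1 p.2

def supports_ssl_alt (line : String) : Bool :=
  let segs := pvSegs line.toList []
  let p := pvCollect segs false PySem.Set.empty PySem.Set.empty
  !(PySem.Set.inter p.1 p.2).isEmpty

-- ===== PRECONDITION & SPEC =====
def Spec_supports_ssl (line : String) (out : Bool) : Prop := out = supports_ssl_alt line
instance (line : String) (out : Bool) : Decidable (Spec_supports_ssl line out) := by unfold Spec_supports_ssl; infer_instance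

-- ===== CLAIM (what is proved, stated in full; the proofs are below) =====
def Claim_equal_supports_ssl : Prop := ∀ (line : String), Dom_supports_ssl line → Spec_supports_ssl line (supports_ssl line)

-- ===== LEMMAS AND PROOFS =====

-- windows (a,b) with a = c, a ≠ b, b non-bracket whose bracket-count-before has
-- the parity selected by p (p = false: even / supernet, p = true: odd / hypernet)
def pvWins : List Char → Bool → List (Char × Char)
  | a :: b :: c :: rest, p =>
    if a = '[' ∨ a = ']' then pvWins (b :: c :: rest) (!p)
    else if a = c ∧ a ≠ b ∧ ¬(b = '[' ∨ b = ']') then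
      if p then pvWins (b :: c :: rest) p
      else (a, b) :: pvWins (b :: c :: rest) p
    else pvWins (b :: c :: rest) p
  | _, _ => []

-- cons-style segmentation (proof-side mirror of pvSegs)
def pvSegsR : List Char → List (List Char)
  | [] => [[]]
  | a :: r =>
    if a = '[' ∨ a = ']' then [] :: pvSegsR r
    else match pvSegsR r with
         | h :: t => (a :: h) :: t
         | [] => [[a]]

def pvHead : List Char → List Char
  | [] => []
  | a :: r => if a = '[' ∨ a = ']' then [] else a :: pvHead r

-- the ABA windows of one segment (no brackets inside a segment)
def pvTrips : List Char → List (Char × Char)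
  | a :: b :: c :: rest =>
    if a = c ∧ a ≠ b then (a, b) :: pvTrips (b :: c :: rest)
    else pvTrips (b :: c :: rest)
  | _ => []

-- windows of the segment list at alternating parity, concatenated
def pvFlat : List (List Char) → Bool → List (Char × Char)
  | [], _ => []
  | s :: rest, p => (if p then [] else pvTrips s) ++ pvFlat rest (!p)

-- the head window contributed by a non-bracket char a in front of r
def pvExtra (a : Char) : List Char → List (Char × Char)
  | b :: c :: _ => if a = c ∧ a ≠ b ∧ ¬(b = '[' ∨ b = ']') then [(a, b)] else []
  | _ => []

theorem pvWins_eq3 (a b c : Char) (rest : List Char) (p : Bool) :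
    pvWins (a :: b :: c :: rest) p =
      if a = '[' ∨ a = ']' then pvWins (b :: c :: rest) (!p)
      else if a = c ∧ a ≠ b ∧ ¬(b = '[' ∨ b = ']') then
        if p then pvWins (b :: c :: rest) p else (a, b) :: pvWins (b :: c :: rest) p
      else pvWins (b :: c :: rest) p := rfl

theorem pvTrips_eq3 (a b c : Char) (rest : List Char) :
    pvTrips (a :: b :: c :: rest) =
      if a = c ∧ a ≠ b then (a, b) :: pvTrips (b :: c :: rest)
      else pvTrips (b :: c :: rest) := rfl

theorem pvExtra_eq2 (a b c : Char) (rest : List Char) :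
    pvExtra a (b :: c :: rest) =
      if a = c ∧ a ≠ b ∧ ¬(b = '[' ∨ b = ']') then [(a, b)] else [] := rfl

theorem pvSegsR_head (cs : List Char) : ∃ t, pvSegsR cs = pvHead cs :: t := by
  induction cs with
  | nil => exact ⟨[[]].tail, rfl⟩
  | cons a r ih =>
    obtain ⟨t, ht⟩ := ih
    by_cases hb : a = '[' ∨ a = ']'
    · exact ⟨pvSegsR r, by simp [pvSegsR, pvHead, hb]⟩
    · exact ⟨t, by simp [pvSegsR, pvHead, hb, ht]⟩

theorem pvSegs_eq (cs : List Char) : ∀ cur, ∃ h t, pvSegsR cs = h :: t ∧ pvSegs cs cur = (cur ++ h) :: t := by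
  induction cs with
  | nil => exact fun cur => ⟨[], [], rfl, by simp [pvSegs]⟩
  | cons a r ih =>
    intro cur
    by_cases hb : a = '[' ∨ a = ']'
    · obtain ⟨h, t, h1, h2⟩ := ih []
      refine ⟨[], pvSegsR r, by simp [pvSegsR, hb], ?_⟩
      simp [pvSegs, hb, h2, h1]
    · obtain ⟨h, t, h1, h2⟩ := ih (cur ++ [a])
      exact ⟨a :: h, t, by simp [pvSegsR, hb, h1], by simp [pvSegs, hb, h2]⟩

theorem pvWins_bracket (a : Char) (r : List Char) (p : Bool) (hb : a = '[' ∨ a = ']') :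
    pvWins (a :: r) p = pvWins r (!p) := by
  match r with
  | [] => simp [pvWins]
  | [b] => simp [pvWins]
  | b :: c :: r' => rw [pvWins_eq3, if_pos hb]

theorem pvWins_cons (a : Char) (r : List Char) (p : Bool) (hb : ¬(a = '[' ∨ a = ']')) :
    pvWins (a :: r) p = (if p then [] else pvExtra a r) ++ pvWins r p := by
  match r with
  | [] => cases p <;> simp [pvWins, pvExtra]
  | [b] => cases p <;> simp [pvWins, pvExtra]
  | b :: c :: r' =>
    rw [pvWins_eq3, if_neg hb, pvExtra_eq2]
    by_cases hq : a = c ∧ a ≠ b ∧ ¬(b = '[' ∨ b = ']')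
    · rw [if_pos hq, if_pos hq]; cases p <;> simp
    · rw [if_neg hq, if_neg hq]; cases p <;> simp

theorem pvTrips_head (a : Char) (r : List Char) (hb : ¬(a = '[' ∨ a = ']')) :
    pvTrips (a :: pvHead r) = pvExtra a r ++ pvTrips (pvHead r) := by
  match r with
  | [] => simp [pvTrips, pvHead, pvExtra]
  | [b] => by_cases h1 : b = '[' ∨ b = ']' <;> simp [pvTrips, pvHead, pvExtra, h1]
  | b :: c :: r' =>
    by_cases h1 : b = '[' ∨ b = ']'
    · have hq : ¬(a = c ∧ a ≠ b ∧ ¬(b = '[' ∨ b = ']')) := by tauto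
      rw [pvExtra_eq2, if_neg hq]
      simp [pvHead, pvTrips, h1]
    · by_cases h2 : c = '[' ∨ c = ']'
      · have hac : ¬(a = c) := by rintro rfl; exact hb h2
        have hq : ¬(a = c ∧ a ≠ b ∧ ¬(b = '[' ∨ b = ']')) := by tauto
        rw [pvExtra_eq2, if_neg hq]
        simp [pvHead, pvTrips, h1, h2]
      · have hH : pvHead (b :: c :: r') = b :: c :: pvHead r' := by simp [pvHead, h1, h2]
        rw [hH, pvTrips_eq3, pvExtra_eq2]
        by_cases hq : a = c ∧ a ≠ b
        · rw [if_pos hq, if_pos ⟨hq.1, hq.2, h1⟩]; simp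
        · have hq' : ¬(a = c ∧ a ≠ b ∧ ¬(b = '[' ∨ b = ']')) := by tauto
          rw [if_neg hq, if_neg hq']; simp

theorem pvWins_eq_pvFlat (cs : List Char) : ∀ p, pvWins cs p = pvFlat (pvSegsR cs) p := by
  induction cs with
  | nil => intro p; cases p <;> simp [pvWins, pvSegsR, pvFlat, pvTrips]
  | cons a r ih =>
    intro p
    by_cases hb : a = '[' ∨ a = ']'
    · rw [pvWins_bracket a r p hb, ih (!p)]
      simp [pvSegsR, hb, pvFlat, pvTrips]
    · obtain ⟨t, ht⟩ := pvSegsR_head r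
      have hseg : pvSegsR (a :: r) = (a :: pvHead r) :: t := by
        simp [pvSegsR, hb, ht]
      rw [pvWins_cons a r p hb, ih p, ht, hseg]
      cases p
      · simp [pvFlat, pvTrips_head a r hb, List.append_assoc]
      · simp [pvFlat]

-- characterization of A's loop: true iff some even-parity window's reverse is in
-- babs or among the odd-parity windows, or symmetrically for odd windows
theorem pvAloop_iff (cs : List Char) (A B : PySem.Set (Char × Char)) :
    pvAloop cs A B = true ↔
      ((∃ x ∈ pvWins cs false, (x.2, x.1) ∈ B ∨ (x.2, x.1) ∈ pvWins cs true) ∨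
       (∃ y ∈ pvWins cs true, (y.2, y.1) ∈ A ∨ (y.2, y.1) ∈ pvWins cs false)) := by
  fun_induction pvAloop cs A B with
  | case1 a b c rest abas babs hb ih =>
    rw [ih, pvWins_bracket a (b :: c :: rest) false hb,
      pvWins_bracket a (b :: c :: rest) true hb]
    simp only [Bool.not_false, Bool.not_true]
    exact or_comm
  | case2 a b c rest abas babs hb hq hmem =>
    simp only [true_iff]
    left
    refine ⟨(a, b), ?_, Or.inl hmem⟩
    rw [pvWins_cons a (b :: c :: rest) false hb, pvExtra_eq2, if_pos hq]
    simp
  | case3 a b c rest abas babs hb hq hmem ih =>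
    have hE : pvWins (a :: b :: c :: rest) false = (a, b) :: pvWins (b :: c :: rest) false := by
      rw [pvWins_eq3, if_neg hb, if_pos hq]; simp
    have hO : pvWins (a :: b :: c :: rest) true = pvWins (b :: c :: rest) true := by
      rw [pvWins_eq3, if_neg hb, if_pos hq]; simp
    rw [ih, hE, hO]
    constructor
    · rintro (⟨x, hx, hin⟩ | ⟨⟨y1, y2⟩, hy, hin | hin⟩)
      · exact Or.inl ⟨x, List.mem_cons_of_mem _ hx, hin⟩
      · rcases (PySem.Set.mem_add _ _ _).1 hin with h | h
        · exact Or.inr ⟨(y1, y2), hy, Or.inl h⟩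
        · have h1 : y2 = a := congrArg Prod.fst h
          have h2 : y1 = b := congrArg Prod.snd h
          rw [h1, h2] at hy
          exact Or.inl ⟨(a, b), List.mem_cons_self .., Or.inr hy⟩
      · exact Or.inr ⟨(y1, y2), hy, Or.inr (List.mem_cons_of_mem _ hin)⟩
    · rintro (⟨x, hx, hin⟩ | ⟨⟨y1, y2⟩, hy, hin | hin⟩)
      · rcases List.mem_cons.1 hx with rfl | hx'
        · rcases hin with hin | hin
          · exact absurd hin hmem
          · exact Or.inr ⟨(b, a), hin, Or.inl ((PySem.Set.mem_add _ _ _).2 (Or.inr rfl))⟩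
        · exact Or.inl ⟨x, hx', hin⟩
      · exact Or.inr ⟨(y1, y2), hy, Or.inl ((PySem.Set.mem_add _ _ _).2 (Or.inl hin))⟩
      · rcases List.mem_cons.1 hin with heq | hin'
        · exact Or.inr ⟨(y1, y2), hy, Or.inl ((PySem.Set.mem_add _ _ _).2 (Or.inr heq))⟩
        · exact Or.inr ⟨(y1, y2), hy, Or.inr hin'⟩
  | case4 a b c rest abas babs hb hq ih =>
    have hE : pvWins (a :: b :: c :: rest) false = pvWins (b :: c :: rest) false := by
      rw [pvWins_eq3, if_neg hb, if_neg hq]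
    have hO : pvWins (a :: b :: c :: rest) true = pvWins (b :: c :: rest) true := by
      rw [pvWins_eq3, if_neg hb, if_neg hq]
    rw [ih, hE, hO]
  | case5 x abas babs h => simp [pvWins]

theorem pvScanSeg_eq (seg : List Char) (hyper : Bool) (A B : PySem.Set (Char × Char)) :
    pvScanSeg seg hyper A B =
      if hyper then (A, PySem.Set.update B ((pvTrips seg).map (fun t => (t.2, t.1))))
      else (PySem.Set.update A (pvTrips seg), B) := by
  fun_induction pvScanSeg seg hyper A B with
  | case1 a b c rest abas babs hq ih =>
    have hc : (a = c ∧ a ≠ b) = True := eq_true hq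
    simp [ih, pvTrips_eq3, hc, PySem.Set.update]
  | case2 a b c rest hyper abas babs hq hh ih =>
    have hc : (a = c ∧ a ≠ b) = True := eq_true hq
    rw [ih]
    simp [pvTrips_eq3, hc, hh, PySem.Set.update]
  | case3 a b c rest hyper abas babs hq ih =>
    have hc : (a = c ∧ a ≠ b) = False := eq_false hq
    simp [ih, pvTrips_eq3, hc]
  | case4 seg hyper abas babs h =>
    cases seg with
    | nil => cases hyper <;> simp [pvTrips, PySem.Set.update]
    | cons x xs =>
      cases xs with
      | nil => cases hyper <;> simp [pvTrips, PySem.Set.update]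
      | cons y ys =>
        cases ys with
        | nil => cases hyper <;> simp [pvTrips, PySem.Set.update]
        | cons z zs => exact (h x y z zs rfl).elim

theorem pvCollect_eq (segs : List (List Char)) : ∀ hyper A B,
    pvCollect segs hyper A B =
      (PySem.Set.update A (pvFlat segs hyper),
       PySem.Set.update B ((pvFlat segs (!hyper)).map (fun t => (t.2, t.1)))) := by
  induction segs with
  | nil => intro hyper A B; simp [pvCollect, pvFlat, PySem.Set.update]
  | cons s rest ih =>
    intro hyper A B
    cases hyper <;>
      simp [pvCollect, pvScanSeg_eq, ih, pvFlat, PySem.Set.update, List.foldl_append]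

theorem alt_iff (line : String) :
    supports_ssl_alt line = true ↔
      ∃ x ∈ pvWins line.toList false, (x.2, x.1) ∈ pvWins line.toList true := by
  obtain ⟨h, t, h1, h2⟩ := pvSegs_eq line.toList []
  have hL0 : supports_ssl_alt line =
      !(PySem.Set.inter
          (pvCollect (pvSegs line.toList []) false PySem.Set.empty PySem.Set.empty).1
          (pvCollect (pvSegs line.toList []) false PySem.Set.empty PySem.Set.empty).2).isEmpty := rfl
  rw [hL0, h2, List.nil_append, ← h1, pvCollect_eq]
  have hne : ∀ (L : List (Char × Char)), ((!L.isEmpty) = true ↔ ∃ x, x ∈ L) := by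
    intro L
    cases L with
    | nil => simp
    | cons x xs => simp
  rw [hne]
  constructor
  · rintro ⟨x, hx⟩
    rw [PySem.Set.mem_inter] at hx
    obtain ⟨hx1, hx2⟩ := hx
    rw [PySem.Set.mem_update] at hx1 hx2
    simp only [PySem.Set.empty, List.not_mem_nil, false_or, List.mem_map] at hx1 hx2
    obtain ⟨u, hu, rfl⟩ := hx2
    refine ⟨(u.2, u.1), ?_, ?_⟩
    · rw [pvWins_eq_pvFlat]; exact hx1
    · rw [pvWins_eq_pvFlat]; simpa using hu
  · rintro ⟨x, hx1, hx2⟩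
    rw [pvWins_eq_pvFlat] at hx1 hx2
    refine ⟨x, ?_⟩
    rw [PySem.Set.mem_inter, PySem.Set.mem_update, PySem.Set.mem_update]
    simp only [PySem.Set.empty, List.not_mem_nil, false_or, List.mem_map]
    exact ⟨hx1, ⟨(x.2, x.1), hx2, rfl⟩⟩

-- ===== VERDICT (by name: the statement is the Claim_ definition above) =====
theorem supports_ssl_spec : Claim_equal_supports_ssl := by
  intro line _
  unfold Spec_supports_ssl
  rw [Bool.eq_iff_iff]
  unfold supports_ssl
  rw [pvAloop_iff, alt_iff]
  simp only [PySem.Set.empty, List.not_mem_nil, false_or]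
  constructor
  · rintro (⟨x, hx, hin⟩ | ⟨y, hy, hin⟩)
    · exact ⟨x, hx, hin⟩
    · exact ⟨(y.2, y.1), hin, by simpa using hy⟩
  · rintro ⟨x, hx, hin⟩
    exact Or.inl ⟨x, hx, hin⟩
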